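-- pv_equiv track=rewrite | github.com/pypi-data/pypi-mirror-401 | packages/motile-tracker/motile_tracker-4.3.0.tar.gz/motile_tracker-4.3.0/src/motile_tracker/data_views/views/tree_view/tree_widget_utils.py | order_roots_by_prev
-- ===== SOURCE A (Python) =====
-- def order_roots_by_prev(prev_axis_order: list[int], roots: list[int]) -> list[int]:
--     """Order a list of root nodes by the previous order, insert missing orders immediately
--     to the right of the closest smaller numerical element.
--
--     Args:
--         prev_axis_order (list[int]): the previous order of root nodes.
--         roots (list[int]): the to be sorted list of root nodes.
--
--     Returns:
--         list[int]: sorted list of root nodes.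
--     """
--
--     roots_in_prev = [r for r in prev_axis_order if r in roots]
--     missing = sorted(set(roots) - set(roots_in_prev))
--
--     for r in missing:
--         # find the index of the rightmost smaller element in roots_in_prev
--         smaller = [x for x in roots_in_prev if x < r]
--         idx = roots_in_prev.index(max(smaller)) + 1 if smaller else 0
--         roots_in_prev.insert(idx, r)
--
--     return roots_in_prev
-- ===== SOURCE B (Python) =====
-- def order_roots_by_prev(prev_axis_order: list[int], roots: list[int]) -> list[int]:
--     root_set = set(roots)
--     base = [v for v in prev_axis_order if v in root_set]
--     base_vals = sorted(set(base))
--     missing = sorted(root_set - set(base))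
--     # assign each missing value to its predecessor among base values (two-pointer merge)
--     front = []
--     groups = {}
--     j = 0
--     pred = None
--     for m in missing:
--         while j < len(base_vals) and base_vals[j] < m:
--             pred = base_vals[j]
--             j += 1
--         if pred is None:
--             front.append(m)
--         else:
--             groups.setdefault(pred, []).append(m)
--     # single pass over base, splicing each group after the first occurrence of its predecessor
--     out = front
--     seen = set()
--     for v in base:
--         out.append(v)
--         if v not in seen:
--             seen.add(v)
--             out += groups.get(v, [])
--     return out
-- ===== Notes on version B (the rewrite author's own statement) =====
-- stated objective: faster
-- what changed: A rescans the growing result list for every missing root (filter, max, index) before each insert; B sorts the distinct base values once, assigns every missing root to its numeric predecessor with a single two-pointer merge over the two sorted lists, and splices each predecessor's group into the base order in one final pass.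
import Mathlib
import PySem

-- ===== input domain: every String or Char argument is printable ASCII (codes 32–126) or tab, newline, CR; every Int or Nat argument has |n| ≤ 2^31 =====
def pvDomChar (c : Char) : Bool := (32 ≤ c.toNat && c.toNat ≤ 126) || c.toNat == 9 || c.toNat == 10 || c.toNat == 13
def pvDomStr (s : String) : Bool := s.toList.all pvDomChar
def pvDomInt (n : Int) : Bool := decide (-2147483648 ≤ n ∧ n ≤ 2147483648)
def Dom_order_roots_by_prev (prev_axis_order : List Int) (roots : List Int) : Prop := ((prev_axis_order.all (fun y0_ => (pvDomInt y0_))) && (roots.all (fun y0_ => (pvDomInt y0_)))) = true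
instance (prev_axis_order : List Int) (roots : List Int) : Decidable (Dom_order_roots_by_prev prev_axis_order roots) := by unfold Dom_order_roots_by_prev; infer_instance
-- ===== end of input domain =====

-- B replaces A's per-missing-element rescans of the growing list by one sort plus a two-pointer
-- pass assigning each missing value to its predecessor and a single splice pass (faster, asymptotic).

-- ===== PORT A =====
def order_roots_by_prev (prev_axis_order : List Int) (roots : List Int) : List Int :=
  let roots_in_prev := prev_axis_order.filter (fun r => roots.contains r)
  let missing := PySem.List.sorted
    (PySem.Set.diff (PySem.Set.ofList roots) (PySem.Set.ofList roots_in_prev)) (fun x => x) false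
  missing.foldl (fun rip r =>
    let smaller := rip.filter (fun x => decide (x < r))
    let idx : Int :=
      match PySem.List.max? smaller (fun x => x) with
      | some m => ((PySem.List.index? rip m).getD 0 : Int) + 1
      | none => 0
    PySem.List.insert rip idx r) roots_in_prev

-- ===== PORT B =====
-- the 'while j < len(base_vals) and base_vals[j] < m' loop of Source B
def pvAdvance (base_vals : List Int) (m : Int) (j : Nat) (pred : Option Int) : Nat × Option Int :=
  if h : j < base_vals.length ∧ base_vals.getD j 0 < m then
    pvAdvance base_vals m (j + 1) (some (base_vals.getD j 0))
  else (j, pred)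
termination_by base_vals.length - j
decreasing_by obtain ⟨h1, _⟩ := h; omega

def order_roots_by_prev_alt (prev_axis_order : List Int) (roots : List Int) : List Int :=
  let root_set := PySem.Set.ofList roots
  let base := prev_axis_order.filter (fun v => PySem.Set.contains root_set v)
  let base_vals := PySem.List.sorted (PySem.Set.ofList base) (fun x => x) false
  let missing := PySem.List.sorted (PySem.Set.diff root_set (PySem.Set.ofList base)) (fun x => x) false
  let st := missing.foldl
    (fun (st : (List Int × PySem.Dict Int (List Int)) × (Nat × Option Int)) m =>
      match pvAdvance base_vals m st.2.1 st.2.2 with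
      | (j', none) => ((st.1.1 ++ [m], st.1.2), (j', none))
      | (j', some p) =>
        ((st.1.1, PySem.Dict.modify st.1.2 p [] (fun g => g ++ [m])), (j', some p)))
    (([], PySem.Dict.empty), (0, none))
  let out := base.foldl
    (fun (acc : List Int × PySem.Set Int) v =>
      if PySem.Set.contains acc.2 v then (acc.1 ++ [v], acc.2)
      else (acc.1 ++ [v] ++ PySem.Dict.getD st.1.2 v [], PySem.Set.add acc.2 v))
    (st.1.1, PySem.Set.empty)
  out.1

-- ===== PRECONDITION & SPEC =====
def Spec_order_roots_by_prev (prev_axis_order : List Int) (roots : List Int) (out : List Int) : Prop := out = order_roots_by_prev_alt prev_axis_order roots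
instance (prev_axis_order : List Int) (roots : List Int) (out : List Int) : Decidable (Spec_order_roots_by_prev prev_axis_order roots out) := by unfold Spec_order_roots_by_prev; infer_instance

-- ===== CLAIM (what is proved, stated in full; the proofs are below) =====
def Claim_equal_order_roots_by_prev : Prop := ∀ (prev_axis_order : List Int) (roots : List Int), Dom_order_roots_by_prev prev_axis_order roots → Spec_order_roots_by_prev prev_axis_order roots (order_roots_by_prev prev_axis_order roots)

-- ===== LEMMAS AND PROOFS =====

-- the predecessor of m among the values of base: the largest base value < m
def predOf (base : List Int) (m : Int) : Option Int :=
  PySem.List.max? (base.filter (fun x => decide (x < m))) (fun x => x)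

-- the missing values assigned to predecessor v, in S's (ascending) order
def grpOf (base S : List Int) (v : Int) : List Int :=
  S.filter (fun m => decide (predOf base m = some v))

-- the missing values with no predecessor
def frontOf (base S : List Int) : List Int :=
  S.filter (fun m => decide (predOf base m = none))

-- base with each group spliced in right after the first occurrence of its predecessor
def weave (g : Int → List Int) : List Int → List Int → List Int
  | [], _ => []
  | v :: t, seen => if v ∈ seen then v :: weave g t seen else v :: (g v ++ weave g t (v :: seen))

def specList (base S : List Int) : List Int :=
  frontOf base S ++ weave (grpOf base S) base []

-- ---- generic max?/predOf characterisations ----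
theorem max?_id_char {L : List Int} {y : Int} (h : PySem.List.max? L (fun x => x) = some y) :
    y ∈ L ∧ ∀ x ∈ L, x ≤ y :=
  ⟨PySem.List.max?_mem h, fun x hx => PySem.List.max?_isMax h x hx⟩

theorem max?_id_eq_some {L : List Int} {y : Int} (hy : y ∈ L) (hmax : ∀ x ∈ L, x ≤ y) :
    PySem.List.max? L (fun x => x) = some y := by
  cases h : PySem.List.max? L (fun x => x) with
  | none =>
    rw [PySem.List.max?_eq_none_iff] at h
    subst h; cases hy
  | some z =>
    obtain ⟨hz, hall⟩ := max?_id_char h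
    have h1 : y ≤ z := hall y hy
    have h2 : z ≤ y := hmax z hz
    rw [le_antisymm h2 h1]

theorem predOf_none_iff {base : List Int} {m : Int} :
    predOf base m = none ↔ ∀ x ∈ base, ¬ x < m := by
  unfold predOf
  rw [PySem.List.max?_eq_none_iff, List.filter_eq_nil_iff]
  simp

theorem predOf_some_char {base : List Int} {m q : Int} (h : predOf base m = some q) :
    q ∈ base ∧ q < m ∧ ∀ x ∈ base, x < m → x ≤ q := by
  obtain ⟨hq, hall⟩ := max?_id_char h
  rw [List.mem_filter] at hq
  refine ⟨hq.1, by simpa using hq.2, fun x hx hxm => hall x ?_⟩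
  rw [List.mem_filter]; exact ⟨hx, by simpa using hxm⟩

theorem predOf_eq_some {base : List Int} {m q : Int} (hq : q ∈ base) (hqm : q < m)
    (hmax : ∀ x ∈ base, x < m → x ≤ q) : predOf base m = some q := by
  unfold predOf
  refine max?_id_eq_some ?_ ?_
  · rw [List.mem_filter]; exact ⟨hq, by simpa using hqm⟩
  · intro x hx; rw [List.mem_filter] at hx
    exact hmax x hx.1 (by simpa using hx.2)

-- ---- membership lemmas ----
theorem mem_frontOf {base S : List Int} {x : Int} :
    x ∈ frontOf base S ↔ x ∈ S ∧ predOf base x = none := by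
  unfold frontOf; rw [List.mem_filter]; simp

theorem mem_grpOf {base S : List Int} {x v : Int} :
    x ∈ grpOf base S v ↔ x ∈ S ∧ predOf base x = some v := by
  unfold grpOf; rw [List.mem_filter]; simp

theorem mem_weave {g : Int → List Int} {base seen : List Int} {x : Int} :
    x ∈ weave g base seen ↔ x ∈ base ∨ ∃ v, v ∈ base ∧ v ∉ seen ∧ x ∈ g v := by
  induction base generalizing seen with
  | nil => simp [weave]
  | cons v t ih =>
    by_cases hv : v ∈ seen
    · simp only [weave, if_pos hv, List.mem_cons, ih]
      constructor
      · rintro (h | h | ⟨w, hw, hws, hx⟩)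
        · exact Or.inl (by simp [h])
        · exact Or.inl (by simp [h])
        · exact Or.inr ⟨w, by simp [hw], hws, hx⟩
      · rintro (h | ⟨w, hw, hws, hx⟩)
        · rcases h with h | h
          · exact Or.inl h
          · exact Or.inr (Or.inl h)
        · rcases hw with h | h
          · exact absurd (h ▸ hv) hws
          · exact Or.inr (Or.inr ⟨w, h, hws, hx⟩)
    · simp only [weave, if_neg hv, List.mem_cons, List.mem_append, ih]
      constructor
      · rintro (h | h | h | ⟨w, hw, hws, hx⟩)
        · exact Or.inl (by simp [h])
        · exact Or.inr ⟨v, by simp, hv, h⟩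
        · exact Or.inl (by simp [h])
        · exact Or.inr ⟨w, by simp [hw], fun hc => hws (by simp [hc]), hx⟩
      · rintro (h | ⟨w, hw, hws, hx⟩)
        · rcases h with h | h
          · exact Or.inl h
          · exact Or.inr (Or.inr (Or.inl h))
        · rcases hw with h | h
          · subst h; exact Or.inr (Or.inl hx)
          · by_cases hwv : w = v
            · subst hwv; exact Or.inr (Or.inl hx)
            · exact Or.inr (Or.inr (Or.inr ⟨w, h, by simp [hwv, hws], hx⟩))

theorem mem_specList {base S : List Int} {x : Int} :
    x ∈ specList base S ↔ x ∈ base ∨ x ∈ S := by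
  unfold specList
  rw [List.mem_append, mem_frontOf, mem_weave]
  constructor
  · rintro (⟨hxS, _⟩ | h | ⟨v, hv, _, hx⟩)
    · exact Or.inr hxS
    · exact Or.inl h
    · exact Or.inr (mem_grpOf.mp hx).1
  · rintro (h | h)
    · exact Or.inr (Or.inl h)
    · cases hp : predOf base x with
      | none => exact Or.inl ⟨h, rfl⟩
      | some v =>
        exact Or.inr (Or.inr ⟨v, (predOf_some_char hp).1, by simp, mem_grpOf.mpr ⟨h, hp⟩⟩)

-- ---- weave structural lemmas ----
theorem weave_nil_groups {g : Int → List Int} {base seen : List Int}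
    (h : ∀ v, g v = []) : weave g base seen = base := by
  induction base generalizing seen with
  | nil => rfl
  | cons v t ih => by_cases hv : v ∈ seen <;> simp [weave, hv, h, ih]

theorem weave_congr {g g' : Int → List Int} {base seen : List Int}
    (h : ∀ v, g v = g' v) : weave g base seen = weave g' base seen := by
  induction base generalizing seen with
  | nil => rfl
  | cons v t ih => by_cases hv : v ∈ seen <;> simp [weave, hv, h, ih]

-- congruence only on unseen keys
theorem weave_congr_unseen {g g' : Int → List Int} {base seen : List Int}
    (h : ∀ v, v ∉ seen → g v = g' v) : weave g base seen = weave g' base seen := by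
  induction base generalizing seen with
  | nil => rfl
  | cons v t ih =>
    by_cases hv : v ∈ seen
    · simp only [weave, if_pos hv]; rw [ih h]
    · simp only [weave, if_neg hv]
      rw [h v hv, ih (seen := v :: seen) (fun w hw => h w (fun hc => hw (by simp [hc])))]

theorem weave_seen_congr {g : Int → List Int} {base s1 s2 : List Int}
    (h : ∀ v, v ∈ s1 ↔ v ∈ s2) : weave g base s1 = weave g base s2 := by
  induction base generalizing s1 s2 with
  | nil => rfl
  | cons v t ih =>
    by_cases hv : v ∈ s1
    · simp [weave, hv, (h v).mp hv, ih h]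
    · have hv2 : v ∉ s2 := fun hc => hv ((h v).mpr hc)
      simp only [weave, if_neg hv, if_neg hv2]
      rw [ih (s1 := v :: s1) (s2 := v :: s2) (by intro w; simp [h w])]

-- decomposition at the first unseen occurrence of a base value q
theorem weave_decomp_base {g : Int → List Int} {base seen : List Int} {q : Int}
    (hq : q ∈ base) (hqs : q ∉ seen) (hg : ∀ v, q ∉ g v) :
    ∃ α β, weave g base seen = α ++ q :: (g q ++ β) ∧ q ∉ α ∧
      ∀ h : Int → List Int, (∀ v, v ≠ q → h v = g v) →
        weave h base seen = α ++ q :: (h q ++ β) := by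
  induction base generalizing seen with
  | nil => cases hq
  | cons v t ih =>
    by_cases hvq : v = q
    · subst hvq
      refine ⟨[], weave g t (v :: seen), ?_, by simp, ?_⟩
      · simp [weave, hqs]
      · intro h hh
        have hcongr : weave h t (v :: seen) = weave g t (v :: seen) :=
          weave_congr_unseen (fun w hw => hh w (fun hc => hw (by simp [hc])))
        simp [weave, hqs, hcongr]
    · have hqt : q ∈ t := by
        rcases List.mem_cons.mp hq with h | h
        · exact absurd h.symm hvq
        · exact h
      by_cases hv : v ∈ seen
      · obtain ⟨α, β, heq, hqa, hcl⟩ := ih hqt hqs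
        refine ⟨v :: α, β, ?_, ?_, ?_⟩
        · simp [weave, hv, heq]
        · simp only [List.mem_cons]
          rintro (h | h)
          · exact hvq h.symm
          · exact hqa h
        · intro h hh; simp [weave, hv, hcl h hh]
      · have hqs' : q ∉ v :: seen := by
          simp only [List.mem_cons]; rintro (h | h)
          · exact hvq h.symm
          · exact hqs h
        obtain ⟨α, β, heq, hqa, hcl⟩ := ih hqt hqs'
        refine ⟨v :: (g v ++ α), β, ?_, ?_, ?_⟩
        · simp [weave, hv, heq]
        · simp only [List.mem_cons, List.mem_append]
          rintro (h | h | h)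
          · exact hvq h.symm
          · exact hg v h
          · exact hqa h
        · intro h hh
          simp [weave, hv, hcl h hh, hh v hvq]

-- decomposition at the unique occurrence of a group element m0 (last of its group)
theorem weave_decomp_grp {g : Int → List Int} {base seen : List Int} {q m0 r : Int}
    {γ : List Int}
    (hq : q ∈ base) (hqs : q ∉ seen) (hgq : g q = γ ++ [m0])
    (hm0b : m0 ∉ base) (hm0γ : m0 ∉ γ) (hm0g : ∀ v, v ≠ q → m0 ∉ g v) :
    ∃ α β, weave g base seen = α ++ m0 :: β ∧ m0 ∉ α ∧
      ∀ h : Int → List Int, (∀ v, v ≠ q → h v = g v) → h q = g q ++ [r] →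
        weave h base seen = α ++ m0 :: r :: β := by
  induction base generalizing seen with
  | nil => cases hq
  | cons v t ih =>
    have hm0t : m0 ∉ t := fun hc => hm0b (by simp [hc])
    have hm0v : m0 ≠ v := fun hc => hm0b (by simp [hc])
    by_cases hvq : v = q
    · subst hvq
      refine ⟨v :: γ, weave g t (v :: seen), ?_, ?_, ?_⟩
      · simp [weave, hqs, hgq]
      · simp only [List.mem_cons]; rintro (h | h)
        · exact hm0v h
        · exact hm0γ h
      · intro h hh hhq
        have hcongr : weave h t (v :: seen) = weave g t (v :: seen) :=
          weave_congr_unseen (fun w hw => hh w (fun hc => hw (by simp [hc])))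
        simp [weave, hqs, hhq, hgq, hcongr]
    · have hqt : q ∈ t := by
        rcases List.mem_cons.mp hq with h | h
        · exact absurd h.symm hvq
        · exact h
      by_cases hv : v ∈ seen
      · obtain ⟨α, β, heq, hma, hcl⟩ := ih hqt hqs hm0t
        refine ⟨v :: α, β, ?_, ?_, ?_⟩
        · simp [weave, hv, heq]
        · simp [hma, hm0v]
        · intro h hh hhq; simp [weave, hv, hcl h hh hhq]
      · have hqs' : q ∉ v :: seen := by
          simp only [List.mem_cons]; rintro (h | h)
          · exact hvq h.symm
          · exact hqs h
        obtain ⟨α, β, heq, hma, hcl⟩ := ih hqt hqs' hm0t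
        refine ⟨v :: (g v ++ α), β, ?_, ?_, ?_⟩
        · simp [weave, hv, heq]
        · simp only [List.mem_cons, List.mem_append]
          rintro (h | h | h)
          · exact hm0v h
          · exact hm0g v hvq h
          · exact hma h
        · intro h hh hhq
          simp [weave, hv, hcl h hh hhq, hh v hvq]

-- ---- the Python insert-after-first-occurrence step ----
theorem insert_after_first {u w : List Int} {p r : Int} (hp : p ∉ u) :
    PySem.List.insert (u ++ p :: w) (((PySem.List.index? (u ++ p :: w) p).getD 0 : Int) + 1) r
      = u ++ p :: r :: w := by
  have hidx : PySem.List.index? (u ++ p :: w) p = some u.length := by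
    rw [PySem.List.index?_eq_some_iff]
    exact ⟨u, w, rfl, rfl, hp⟩
  rw [hidx]
  have hcast : ((u.length : Int) + 1) = ((u.length + 1 : Nat) : Int) := by push_cast; ring
  simp only [Option.getD_some]
  rw [hcast, PySem.List.insert_natCast _ _ _ (by simp)]
  have h1 : (u ++ p :: w).take (u.length + 1) = u ++ [p] := by
    rw [List.take_append]; simp
  have h2 : (u ++ p :: w).drop (u.length + 1) = w := by
    rw [List.drop_append]; simp
  rw [h1, h2]; simp

-- A's loop body as a function
def stepA (rip : List Int) (r : Int) : List Int :=
  PySem.List.insert rip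
    (match PySem.List.max? (rip.filter (fun x => decide (x < r))) (fun x => x) with
     | some m => ((PySem.List.index? rip m).getD 0 : Int) + 1
     | none => 0) r

theorem frontOf_nil {base : List Int} : frontOf base [] = [] := rfl
theorem grpOf_nil {base : List Int} {v : Int} : grpOf base [] v = [] := rfl

theorem specList_nil {base : List Int} : specList base [] = base := by
  unfold specList frontOf
  simp only [List.filter_nil, List.nil_append]
  exact weave_nil_groups (fun v => rfl)

theorem frontOf_append_singleton {base S : List Int} {r : Int} :
    frontOf base (S ++ [r]) = frontOf base S ++ (if predOf base r = none then [r] else []) := by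
  unfold frontOf
  rw [List.filter_append]
  congr 1
  by_cases h : predOf base r = none <;> simp [h]

theorem grpOf_append_singleton {base S : List Int} {r v : Int} :
    grpOf base (S ++ [r]) v = grpOf base S v ++ (if predOf base r = some v then [r] else []) := by
  unfold grpOf
  rw [List.filter_append]
  congr 1
  by_cases h : predOf base r = some v <;> simp [h]

theorem grpOf_subset {base S : List Int} {x v : Int} (h : x ∈ grpOf base S v) : x ∈ S :=
  (mem_grpOf.mp h).1

-- ---- the core step lemma ----
theorem stepA_specList {base S : List Int} {r : Int}
    (hSb : ∀ m ∈ S, m ∉ base) (hSp : S.Pairwise (· < ·))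
    (hSr : ∀ m ∈ S, m < r) (_hrb : r ∉ base) :
    stepA (specList base S) r = specList base (S ++ [r]) := by
  have hrS : r ∉ S := fun hc => lt_irrefl r (hSr r hc)
  have hmem : ∀ x, x ∈ (specList base S).filter (fun x => decide (x < r)) ↔
      (x ∈ base ∨ x ∈ S) ∧ x < r := by
    intro x; rw [List.mem_filter, mem_specList]; simp
  rcases List.eq_nil_or_concat S with hSnil | ⟨S', m0, hSc⟩
  · -- S = []
    subst hSnil
    cases hpr : predOf base r with
    | none =>
      have hsm : (specList base []).filter (fun x => decide (x < r)) = [] := by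
        rw [List.filter_eq_nil_iff]
        intro x hx hlt
        rcases mem_specList.mp hx with h | h
        · exact predOf_none_iff.mp hpr x h (by simpa using hlt)
        · cases h
      have hmax : PySem.List.max? ((specList base []).filter (fun x => decide (x < r)))
          (fun x => x) = none := by rw [hsm, PySem.List.max?_eq_none_iff]
      unfold stepA
      rw [hmax]
      simp only [PySem.List.insert_zero]
      rw [specList_nil]
      unfold specList
      rw [frontOf_append_singleton]
      have hfn : frontOf base [] = [] := rfl
      have hw : weave (grpOf base ([] ++ [r])) base [] = base := by
        apply weave_nil_groups
        intro v
        rw [List.nil_append, show grpOf base [r] v = grpOf base ([] ++ [r]) v from rfl,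
          grpOf_append_singleton]
        simp [hpr, grpOf_nil]
      rw [List.nil_append] at hw ⊢
      rw [hw, hfn, hpr]
      simp
    | some q =>
      obtain ⟨hqb, hqr, hqmax⟩ := predOf_some_char hpr
      have hmax : PySem.List.max? ((specList base []).filter (fun x => decide (x < r)))
          (fun x => x) = some q := by
        apply max?_id_eq_some
        · exact (hmem q).mpr ⟨Or.inl hqb, hqr⟩
        · intro x hx
          rcases (hmem x).mp hx with ⟨h | h, hlt⟩
          · exact hqmax x h hlt
          · cases h
      obtain ⟨α, β, heq, hqa, hcl⟩ := weave_decomp_base (g := grpOf base [])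
        (seen := ([] : List Int)) hqb (by simp) (fun v => by simp [grpOf])
      have hgq : grpOf base [] q = [] := rfl
      have hl : specList base [] = α ++ q :: β := by
        unfold specList
        rw [heq, hgq]
        rfl
      unfold stepA
      rw [hmax, hl, insert_after_first hqa]
      unfold specList
      rw [frontOf_append_singleton, hpr]
      have hw : weave (grpOf base ([] ++ [r])) base [] = α ++ q :: (grpOf base ([] ++ [r]) q ++ β) := by
        apply hcl
        intro v hv
        rw [List.nil_append, show grpOf base [r] v = grpOf base ([] ++ [r]) v from rfl,
          grpOf_append_singleton]
        simp [hpr, Ne.symm hv, grpOf_nil]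
      have hq2 : grpOf base ([] ++ [r]) q = [r] := by
        rw [grpOf_append_singleton (S := ([] : List Int)), hgq, hpr]
        simp
      rw [hw, hq2]
      simp [frontOf_nil]
  · -- S = S' ++ [m0]
    rw [List.concat_eq_append] at hSc
    subst hSc
    have hpair := List.pairwise_append.mp hSp
    have hS'm0 : ∀ x ∈ S', x < m0 := fun x hx => hpair.2.2 x hx m0 (by simp)
    have hm0S : m0 ∈ S' ++ [m0] := by simp
    have hm0max : ∀ x ∈ S' ++ [m0], x ≤ m0 := by
      intro x hx
      rcases List.mem_append.mp hx with h | h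
      · exact le_of_lt (hS'm0 x h)
      · simp at h; omega
    have hm0r : m0 < r := hSr m0 hm0S
    have hm0b : m0 ∉ base := hSb m0 hm0S
    have hm0S' : m0 ∉ S' := fun hc => lt_irrefl m0 (hS'm0 m0 hc)
    cases hpr : predOf base r with
    | none =>
      have hpm : predOf base m0 = none := by
        rw [predOf_none_iff]
        intro x hx hlt
        exact predOf_none_iff.mp hpr x hx (lt_trans hlt hm0r)
      have hmax : PySem.List.max? (((specList base (S' ++ [m0]))).filter
          (fun x => decide (x < r))) (fun x => x) = some m0 := by
        apply max?_id_eq_some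
        · exact (hmem m0).mpr ⟨Or.inr hm0S, hm0r⟩
        · intro x hx
          rcases (hmem x).mp hx with ⟨h | h, hlt⟩
          · exact absurd hlt (predOf_none_iff.mp hpr x h)
          · exact hm0max x h
      have hfr : frontOf base (S' ++ [m0]) = frontOf base S' ++ [m0] := by
        rw [frontOf_append_singleton, hpm]; simp
      have hm0f : m0 ∉ frontOf base S' := fun hc => hm0S' (mem_frontOf.mp hc).1
      have hl : specList base (S' ++ [m0]) =
          frontOf base S' ++ m0 :: weave (grpOf base (S' ++ [m0])) base [] := by
        unfold specList
        rw [hfr]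
        simp
      unfold stepA
      rw [hmax, hl, insert_after_first hm0f]
      unfold specList
      rw [frontOf_append_singleton (S := S' ++ [m0]), hpr, hfr]
      have hw : weave (grpOf base ((S' ++ [m0]) ++ [r])) base []
          = weave (grpOf base (S' ++ [m0])) base [] := by
        apply weave_congr
        intro v
        rw [grpOf_append_singleton, hpr]
        simp
      rw [hw]
      simp
    | some q =>
      obtain ⟨hqb, hqr, hqmax⟩ := predOf_some_char hpr
      have hqm0 : q ≠ m0 := fun hc => hm0b (hc ▸ hqb)
      have hqS : ∀ x ∈ S' ++ [m0], x ≠ q := fun x hx hc => hSb x hx (hc ▸ hqb)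
      rcases lt_or_gt_of_ne hqm0 with hqlt | hqgt
      · -- q < m0 : insert after m0, last of group q
        have hpm : predOf base m0 = some q := by
          apply predOf_eq_some hqb hqlt
          intro x hx hlt
          exact hqmax x hx (lt_trans hlt hm0r)
        have hmax : PySem.List.max? (((specList base (S' ++ [m0]))).filter
            (fun x => decide (x < r))) (fun x => x) = some m0 := by
          apply max?_id_eq_some
          · exact (hmem m0).mpr ⟨Or.inr hm0S, hm0r⟩
          · intro x hx
            rcases (hmem x).mp hx with ⟨h | h, hlt⟩
            · exact le_trans (hqmax x h hlt) (le_of_lt hqlt)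
            · exact hm0max x h
        have hgq : grpOf base (S' ++ [m0]) q = grpOf base S' q ++ [m0] := by
          rw [grpOf_append_singleton, hpm]; simp
        have hm0γ : m0 ∉ grpOf base S' q := fun hc => hm0S' (grpOf_subset hc)
        have hm0g : ∀ v, v ≠ q → m0 ∉ grpOf base (S' ++ [m0]) v := by
          intro v hv hc
          have := (mem_grpOf.mp hc).2
          rw [hpm] at this
          injection this with h
          exact hv h.symm
        obtain ⟨α, β, heq, hma, hcl⟩ := weave_decomp_grp (seen := ([] : List Int)) (r := r)
          hqb (by simp) hgq hm0b hm0γ hm0g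
        have hm0f : m0 ∉ frontOf base (S' ++ [m0]) := by
          intro hc
          have := (mem_frontOf.mp hc).2
          rw [hpm] at this
          cases this
        have hl : specList base (S' ++ [m0]) =
            (frontOf base (S' ++ [m0]) ++ α) ++ m0 :: β := by
          unfold specList
          rw [heq]
          simp
        have hm0u : m0 ∉ frontOf base (S' ++ [m0]) ++ α := by
          simp only [List.mem_append]
          rintro (h | h)
          · exact hm0f h
          · exact hma h
        unfold stepA
        rw [hmax, hl, insert_after_first hm0u]
        unfold specList
        rw [frontOf_append_singleton (S := S' ++ [m0]), hpr]
        have hw : weave (grpOf base ((S' ++ [m0]) ++ [r])) base [] = α ++ m0 :: r :: β := by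
          apply hcl
          · intro v hv
            rw [grpOf_append_singleton, hpr]
            simp [Ne.symm hv]
          · rw [grpOf_append_singleton, hpr]
            simp
        rw [hw]
        simp
      · -- m0 < q : insert after first occurrence of q, empty group
        have hmax : PySem.List.max? (((specList base (S' ++ [m0]))).filter
            (fun x => decide (x < r))) (fun x => x) = some q := by
          apply max?_id_eq_some
          · exact (hmem q).mpr ⟨Or.inl hqb, hqr⟩
          · intro x hx
            rcases (hmem x).mp hx with ⟨h | h, hlt⟩
            · exact hqmax x h hlt
            · exact le_trans (hm0max x h) (le_of_lt hqgt)
        have hgq : grpOf base (S' ++ [m0]) q = [] := by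
          rw [List.eq_nil_iff_forall_not_mem]
          intro m hm
          obtain ⟨hmS, hmp⟩ := mem_grpOf.mp hm
          obtain ⟨_, hqm, _⟩ := predOf_some_char hmp
          have := hm0max m hmS
          omega
        have hgnoq : ∀ v, q ∉ grpOf base (S' ++ [m0]) v := by
          intro v hc
          exact hqS q (grpOf_subset hc) rfl
        obtain ⟨α, β, heq, hqa, hcl⟩ := weave_decomp_base (seen := ([] : List Int))
          hqb (by simp) hgnoq
        have hqf : q ∉ frontOf base (S' ++ [m0]) := by
          intro hc
          exact hqS q (mem_frontOf.mp hc).1 rfl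
        have hl : specList base (S' ++ [m0]) =
            (frontOf base (S' ++ [m0]) ++ α) ++ q :: β := by
          unfold specList
          rw [heq, hgq]
          simp
        have hqu : q ∉ frontOf base (S' ++ [m0]) ++ α := by
          simp only [List.mem_append]
          rintro (h | h)
          · exact hqf h
          · exact hqa h
        unfold stepA
        rw [hmax, hl, insert_after_first hqu]
        unfold specList
        rw [frontOf_append_singleton (S := S' ++ [m0]), hpr]
        have hw : weave (grpOf base ((S' ++ [m0]) ++ [r])) base []
            = α ++ q :: (grpOf base ((S' ++ [m0]) ++ [r]) q ++ β) := by
          apply hcl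
          intro v hv
          rw [grpOf_append_singleton, hpr]
          simp [Ne.symm hv]
        have hq2 : grpOf base ((S' ++ [m0]) ++ [r]) q = [r] := by
          rw [grpOf_append_singleton, hgq, hpr]
          simp
        rw [hw, hq2]
        simp

-- ---- A-side fold ----
theorem foldA_specList {base : List Int} (M : List Int)
    (hMb : ∀ m ∈ M, m ∉ base) (hMp : M.Pairwise (· < ·)) :
    M.foldl stepA base = specList base M := by
  induction M using List.reverseRecOn with
  | nil => exact specList_nil.symm
  | append_singleton l a ih =>
    have hpair := List.pairwise_append.mp hMp
    rw [List.foldl_append, List.foldl_cons, List.foldl_nil,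
      ih (fun m hm => hMb m (by simp [hm])) hpair.1]
    exact stepA_specList (fun m hm => hMb m (by simp [hm])) hpair.1
      (fun m hm => hpair.2.2 m hm a (by simp)) (hMb a (by simp))

-- ---- B-side lemmas ----
theorem filter_eq_take {bv : List Int} {m : Int} {j : Nat} (hj : j ≤ bv.length)
    (hall : ∀ x ∈ bv.take j, x < m) (hge : ∀ x ∈ bv.drop j, ¬ x < m) :
    bv.filter (fun x => decide (x < m)) = bv.take j := by
  conv_lhs => rw [← List.take_append_drop j bv]
  rw [List.filter_append,
    List.filter_eq_self.mpr (fun x hx => by simpa using hall x hx),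
    List.filter_eq_nil_iff.mpr (fun x hx => by simpa using hge x hx),
    List.append_nil]

theorem take_lt_getElem {bv : List Int} (hlt : bv.Pairwise (· < ·)) {j : Nat}
    (hj : j < bv.length) : ∀ x ∈ bv.take j, x < bv[j] := by
  intro x hx
  obtain ⟨k, hk, hxe⟩ := List.mem_iff_getElem.mp hx
  rw [List.getElem_take] at hxe
  have hkj : k < j := by
    have := hk; rw [List.length_take] at this; omega
  subst hxe
  exact List.pairwise_iff_getElem.mp hlt k j _ hj hkj

theorem drop_ge {bv : List Int} {m : Int} (hlt : bv.Pairwise (· < ·)) {j : Nat}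
    (hj : j < bv.length) (hhead : ¬ bv.getD j 0 < m) : ∀ x ∈ bv.drop j, ¬ x < m := by
  intro x hx hxm
  obtain ⟨k, hk, hxe⟩ := List.mem_iff_getElem.mp hx
  rw [List.getElem_drop] at hxe
  rw [List.getD_eq_getElem bv 0 hj] at hhead
  rcases Nat.eq_zero_or_pos k with hk0 | hk0
  · subst hk0; simp at hxe; subst hxe; exact hhead hxm
  · have hlen : j + k < bv.length := by
      have := hk; rw [List.length_drop] at this; omega
    have : bv[j] < bv[j + k] := List.pairwise_iff_getElem.mp hlt j (j + k) hj hlen (by omega)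
    rw [hxe] at this
    exact hhead (lt_trans this hxm)

theorem advance_terminal {bv : List Int} {m : Int} {j : Nat} {pred : Option Int}
    (hj : j ≤ bv.length) (hfil : bv.filter (fun x => decide (x < m)) = bv.take j)
    (hpred : pred = PySem.List.max? (bv.take j) (fun x => x)) :
    ((j : Nat), pred) =
      ((bv.filter (fun x => decide (x < m))).length,
        PySem.List.max? (bv.filter (fun x => decide (x < m))) (fun x => x)) ∧
    bv.take (bv.filter (fun x => decide (x < m))).length
      = bv.filter (fun x => decide (x < m)) := by
  have hlen : (bv.filter (fun x => decide (x < m))).length = j := by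
    rw [hfil, List.length_take]; omega
  constructor
  · rw [hlen, hfil, hpred]
  · rw [hlen, hfil]

theorem advance_spec {bv : List Int} {m : Int} (hlt : bv.Pairwise (· < ·)) :
    ∀ (n j : Nat) (pred : Option Int), bv.length - j = n → j ≤ bv.length →
      (∀ x ∈ bv.take j, x < m) → pred = PySem.List.max? (bv.take j) (fun x => x) →
      pvAdvance bv m j pred =
        ((bv.filter (fun x => decide (x < m))).length,
          PySem.List.max? (bv.filter (fun x => decide (x < m))) (fun x => x)) ∧
      bv.take (bv.filter (fun x => decide (x < m))).length
        = bv.filter (fun x => decide (x < m)) := by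
  intro n
  induction n with
  | zero =>
    intro j pred h0 hj hall hpred
    have hjl : j = bv.length := by omega
    rw [pvAdvance, dif_neg (by rintro ⟨h, _⟩; omega)]
    exact advance_terminal hj
      (filter_eq_take hj hall (by rw [hjl, List.drop_length]; intro x hx; cases hx)) hpred
  | succ n ih =>
    intro j pred h0 hj hall hpred
    have hjlt : j < bv.length := by omega
    rw [pvAdvance]
    by_cases hcond : bv.getD j 0 < m
    · rw [dif_pos ⟨hjlt, hcond⟩]
      have hgd : bv.getD j 0 = bv[j] := List.getD_eq_getElem bv 0 hjlt
      have hts : bv.take (j + 1) = bv.take j ++ [bv[j]] := by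
        rw [List.take_add_one, List.getElem?_eq_getElem hjlt]; rfl
      apply ih (j + 1) _ (by omega) (by omega)
      · intro x hx
        rw [hts, List.mem_append] at hx
        rcases hx with hx | hx
        · exact hall x hx
        · simp at hx; subst hx; rw [hgd] at hcond; exact hcond
      · rw [hgd]
        symm
        apply max?_id_eq_some
        · rw [hts]
          exact List.mem_append_right _ (by simp)
        · intro x hx
          rw [hts, List.mem_append] at hx
          rcases hx with hx | hx
          · exact le_of_lt (take_lt_getElem hlt hjlt x hx)
          · simp at hx; omega
    · rw [dif_neg (by rintro ⟨_, h⟩; exact hcond h)]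
      exact advance_terminal hj
        (filter_eq_take hj hall (drop_ge hlt hjlt hcond)) hpred

theorem predOf_eq_max_bv {base bv : List Int} {m : Int}
    (hbv_mem : ∀ x, x ∈ bv ↔ x ∈ base) :
    PySem.List.max? (bv.filter (fun x => decide (x < m))) (fun x => x) = predOf base m := by
  cases h : predOf base m with
  | none =>
    rw [PySem.List.max?_eq_none_iff, List.filter_eq_nil_iff]
    intro x hx
    simpa using predOf_none_iff.mp h x ((hbv_mem x).mp hx)
  | some q =>
    obtain ⟨hqb, hqm, hqmax⟩ := predOf_some_char h
    apply max?_id_eq_some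
    · rw [List.mem_filter]
      exact ⟨(hbv_mem q).mpr hqb, by simpa using hqm⟩
    · intro x hx
      rw [List.mem_filter] at hx
      exact hqmax x ((hbv_mem x).mp hx.1) (by simpa using hx.2)

theorem frontOf_cons {base : List Int} {m : Int} {M : List Int} :
    frontOf base (m :: M)
      = (if predOf base m = none then [m] else []) ++ frontOf base M := by
  unfold frontOf
  by_cases h : predOf base m = none <;> simp [h]

theorem grpOf_cons {base : List Int} {m v : Int} {M : List Int} :
    grpOf base (m :: M) v
      = (if predOf base m = some v then [m] else []) ++ grpOf base M v := by
  unfold grpOf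
  by_cases h : predOf base m = some v <;> simp [h]

-- the body of Source B's assignment loop, as a function (definitionally the port's lambda)
def bstep (bv : List Int) (st : (List Int × PySem.Dict Int (List Int)) × (Nat × Option Int))
    (m : Int) : (List Int × PySem.Dict Int (List Int)) × (Nat × Option Int) :=
  match pvAdvance bv m st.2.1 st.2.2 with
  | (j', none) => ((st.1.1 ++ [m], st.1.2), (j', none))
  | (j', some p) => ((st.1.1, PySem.Dict.modify st.1.2 p [] (fun g => g ++ [m])), (j', some p))

theorem bstep_none {bv : List Int} {front : List Int} {groups : PySem.Dict Int (List Int)}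
    {j j' : Nat} {pred : Option Int} {m : Int}
    (h : pvAdvance bv m j pred = (j', none)) :
    bstep bv ((front, groups), (j, pred)) m = ((front ++ [m], groups), (j', none)) := by
  unfold bstep
  rw [h]

theorem bstep_some {bv : List Int} {front : List Int} {groups : PySem.Dict Int (List Int)}
    {j j' : Nat} {pred : Option Int} {m p : Int}
    (h : pvAdvance bv m j pred = (j', some p)) :
    bstep bv ((front, groups), (j, pred)) m
      = ((front, PySem.Dict.modify groups p [] (fun g => g ++ [m])), (j', some p)) := by
  unfold bstep
  rw [h]

theorem bloop_spec {base bv : List Int}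
    (hlt : bv.Pairwise (· < ·)) (hbv_mem : ∀ x, x ∈ bv ↔ x ∈ base) :
    ∀ (M front : List Int) (groups : PySem.Dict Int (List Int)) (j : Nat) (pred : Option Int),
      M.Pairwise (· < ·) → j ≤ bv.length →
      (∀ m ∈ M, ∀ x ∈ bv.take j, x < m) →
      pred = PySem.List.max? (bv.take j) (fun x => x) →
      (M.foldl (bstep bv) ((front, groups), (j, pred))).1.1 = front ++ frontOf base M ∧
      ∀ v, PySem.Dict.getD (M.foldl (bstep bv) ((front, groups), (j, pred))).1.2 v []
        = PySem.Dict.getD groups v [] ++ grpOf base M v := by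
  intro M
  induction M with
  | nil =>
    intro front groups j pred _ _ _ _
    exact ⟨by simp [frontOf_nil], fun v => by simp [grpOf_nil]⟩
  | cons m M' ih =>
    intro front groups j pred hMp hj hall hpred
    obtain ⟨hadv, htake⟩ := advance_spec hlt (bv.length - j) j pred rfl hj
      (hall m (by simp)) hpred
    have hpm : PySem.List.max? (bv.filter (fun x => decide (x < m))) (fun x => x)
        = predOf base m := predOf_eq_max_bv hbv_mem
    have hpair := List.pairwise_cons.mp hMp
    have hj' : (bv.filter (fun x => decide (x < m))).length ≤ bv.length := by
      have := List.length_filter_le (fun x => decide (x < m)) bv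
      omega
    have hall' : ∀ m' ∈ M', ∀ x ∈ bv.take (bv.filter (fun x => decide (x < m))).length, x < m' := by
      intro m' hm' x hx
      rw [htake, List.mem_filter] at hx
      have h1 : x < m := by simpa using hx.2
      exact lt_trans h1 (hpair.1 m' hm')
    have hpred' : PySem.List.max? (bv.filter (fun x => decide (x < m))) (fun x => x)
        = PySem.List.max? (bv.take (bv.filter (fun x => decide (x < m))).length) (fun x => x) := by
      rw [htake]
    rw [hpm] at hpred'
    rw [List.foldl_cons]
    cases hp : predOf base m with
    | none =>
      rw [hp] at hpred'
      rw [bstep_none (by rw [hadv, hpm, hp])]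
      obtain ⟨ih1, ih2⟩ := ih (front ++ [m]) groups _ _ hpair.2 hj' hall' hpred'
      constructor
      · rw [ih1, frontOf_cons, hp]
        simp
      · intro v
        rw [ih2 v, grpOf_cons, hp]
        simp
    | some p =>
      rw [hp] at hpred'
      rw [bstep_some (by rw [hadv, hpm, hp])]
      obtain ⟨ih1, ih2⟩ := ih front (PySem.Dict.modify groups p [] (fun g => g ++ [m])) _ _
        hpair.2 hj' hall' hpred'
      constructor
      · rw [ih1, frontOf_cons, hp]
        simp
      · intro v
        rw [ih2 v, grpOf_cons, hp, PySem.Dict.getD_modify]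
        by_cases hv : v = p
        · subst hv; simp
        · simp [hv, Ne.symm hv]

theorem bout_spec {groups : PySem.Dict Int (List Int)} :
    ∀ (b out0 : List Int) (seen : PySem.Set Int),
      (b.foldl (fun (acc : List Int × PySem.Set Int) v =>
          if PySem.Set.contains acc.2 v then (acc.1 ++ [v], acc.2)
          else (acc.1 ++ [v] ++ PySem.Dict.getD groups v [], PySem.Set.add acc.2 v))
        (out0, seen)).1
      = out0 ++ weave (fun v => PySem.Dict.getD groups v []) b seen := by
  intro b
  induction b with
  | nil => intro out0 seen; simp [weave]
  | cons v t ih =>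
    intro out0 seen
    by_cases hv : v ∈ seen
    · have hc : PySem.Set.contains seen v = true := by simpa using hv
      rw [List.foldl_cons, if_pos hc, ih, weave, if_pos hv]
      simp
    · have hc : ¬ PySem.Set.contains seen v = true := by simpa using hv
      rw [List.foldl_cons, if_neg hc, ih, weave, if_neg hv,
        weave_seen_congr (s1 := PySem.Set.add seen v) (s2 := v :: seen)
          (fun w => by rw [PySem.Set.mem_add, List.mem_cons, or_comm])]
      simp

-- B's whole pipeline after the two-pointer loop equals specList
theorem bmain (base M : List Int) (hMp : M.Pairwise (· < ·)) :
    (base.foldl (fun (acc : List Int × PySem.Set Int) v =>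
        if PySem.Set.contains acc.2 v then (acc.1 ++ [v], acc.2)
        else (acc.1 ++ [v] ++ PySem.Dict.getD
            (M.foldl (bstep (PySem.List.sorted (PySem.Set.ofList base) (fun x => x) false))
              (([], PySem.Dict.empty), (0, none))).1.2 v [],
          PySem.Set.add acc.2 v))
      ((M.foldl (bstep (PySem.List.sorted (PySem.Set.ofList base) (fun x => x) false))
          (([], PySem.Dict.empty), (0, none))).1.1, PySem.Set.empty)).1
    = specList base M := by
  have hbv_lt : (PySem.List.sorted (PySem.Set.ofList base) (fun x => x) false).Pairwise (· < ·) :=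
    PySem.List.sorted_ofList_pairwise_lt base
  have hbv_mem : ∀ x, x ∈ PySem.List.sorted (PySem.Set.ofList base) (fun x => x) false
      ↔ x ∈ base := fun x => by rw [PySem.List.mem_sorted, PySem.Set.mem_ofList]
  obtain ⟨hst1, hst2⟩ := bloop_spec hbv_lt hbv_mem M [] PySem.Dict.empty 0 none hMp
    (Nat.zero_le _) (fun m _ x hx => by simp at hx)
    (by symm; rw [List.take_zero, PySem.List.max?_eq_none_iff])
  rw [bout_spec, hst1]
  rw [weave_congr (g' := grpOf base M) (fun v => by
    rw [hst2 v, PySem.Dict.getD_empty, List.nil_append])]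
  unfold specList
  simp only [List.nil_append]
  rfl

-- ===== VERDICT (by name: the statement is the Claim_ definition above) =====
theorem order_roots_by_prev_spec : Claim_equal_order_roots_by_prev := by
  intro prev roots _
  show order_roots_by_prev prev roots = order_roots_by_prev_alt prev roots
  have hfil : prev.filter (fun r => roots.contains r)
      = prev.filter (fun v => PySem.Set.contains (PySem.Set.ofList roots) v) := by
    apply List.filter_congr
    intro x _
    rw [Bool.eq_iff_iff]
    simp [PySem.Set.contains_eq_listContains, PySem.Set.mem_ofList]
  have hA : order_roots_by_prev prev roots
      = (PySem.List.sorted (PySem.Set.diff (PySem.Set.ofList roots)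
            (PySem.Set.ofList (prev.filter (fun v =>
              PySem.Set.contains (PySem.Set.ofList roots) v)))) (fun x => x) false).foldl stepA
          (prev.filter (fun v => PySem.Set.contains (PySem.Set.ofList roots) v)) := by
    simp only [order_roots_by_prev]
    rw [hfil]
    rfl
  have hB : order_roots_by_prev_alt prev roots
      = ((prev.filter (fun v => PySem.Set.contains (PySem.Set.ofList roots) v)).foldl
          (fun (acc : List Int × PySem.Set Int) v =>
            if PySem.Set.contains acc.2 v then (acc.1 ++ [v], acc.2)
            else (acc.1 ++ [v] ++ PySem.Dict.getD
                ((PySem.List.sorted (PySem.Set.diff (PySem.Set.ofList roots)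
                    (PySem.Set.ofList (prev.filter (fun v =>
                      PySem.Set.contains (PySem.Set.ofList roots) v)))) (fun x => x) false).foldl
                  (bstep (PySem.List.sorted (PySem.Set.ofList (prev.filter (fun v =>
                    PySem.Set.contains (PySem.Set.ofList roots) v))) (fun x => x) false))
                  (([], PySem.Dict.empty), (0, none))).1.2 v [],
              PySem.Set.add acc.2 v))
          (((PySem.List.sorted (PySem.Set.diff (PySem.Set.ofList roots)
              (PySem.Set.ofList (prev.filter (fun v =>
                PySem.Set.contains (PySem.Set.ofList roots) v)))) (fun x => x) false).foldl
            (bstep (PySem.List.sorted (PySem.Set.ofList (prev.filter (fun v =>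
              PySem.Set.contains (PySem.Set.ofList roots) v))) (fun x => x) false))
            (([], PySem.Dict.empty), (0, none))).1.1, PySem.Set.empty)).1 := rfl
  rw [hA, hB]
  set B := prev.filter (fun v => PySem.Set.contains (PySem.Set.ofList roots) v) with hBdef
  set M := PySem.List.sorted (PySem.Set.diff (PySem.Set.ofList roots) (PySem.Set.ofList B))
    (fun x => x) false with hMdef
  have hMle : M.Pairwise (fun a b : Int => a ≤ b) := by
    have h := PySem.List.sorted_pairwise
      (xs := PySem.Set.diff (PySem.Set.ofList roots) (PySem.Set.ofList B)) (key := fun x => x)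
    rw [← hMdef] at h
    exact h
  have hnd : M.Nodup := by
    have hperm : (PySem.List.sorted (PySem.Set.diff (PySem.Set.ofList roots)
        (PySem.Set.ofList B)) (fun x => x) false).Perm
        (PySem.Set.diff (PySem.Set.ofList roots) (PySem.Set.ofList B)) :=
      PySem.List.sorted_perm _ _ _
    rw [← hMdef] at hperm
    exact hperm.nodup_iff.mpr (PySem.Set.nodup_diff _ _ (PySem.Set.nodup_ofList roots))
  have hMp : M.Pairwise (· < ·) :=
    (List.Pairwise.and hMle hnd).imp (fun hab => lt_of_le_of_ne hab.1 hab.2)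
  have hMb : ∀ m ∈ M, m ∉ B := by
    intro m hm hc
    rw [hMdef, PySem.List.mem_sorted, PySem.Set.mem_diff] at hm
    refine hm.2 ?_
    rw [PySem.Set.mem_ofList]
    exact hc
  rw [foldA_specList M hMb hMp, bmain B M hMp]
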